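-- pv_equiv track=rewrite | github.com/spassignat/james | parsers/parsers/lang/json_analyzer.py | _detect_separator_style
-- ===== SOURCE A (Python) =====
-- from typing import Dict, Any, List
--
-- def _detect_separator_style(keys: List[str]) -> str:
--     """Détecte le style de séparateur des clés"""
--     if not keys:
--         return 'none'
--
--     has_dots = any('.' in k for k in keys)
--     has_dashes = any('-' in k for k in keys)
--     has_underscores = any('_' in k for k in keys)
--
--     if has_dots:
--         return 'dot_notation'
--     elif has_dashes:
--         return 'kebab_case'
--     elif has_underscores:
--         return 'snake_case'
--     else:
--         return 'simple'
-- ===== SOURCE B (Python) =====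
-- def _detect_separator_style(keys):
--     """Single-pass re-implementation: early return on '.', flags for '-'/'_'."""
--     if not keys:
--         return 'none'
--     has_dashes = False
--     has_underscores = False
--     for k in keys:
--         if '.' in k:
--             return 'dot_notation'
--         if '-' in k:
--             has_dashes = True
--         if '_' in k:
--             has_underscores = True
--     if has_dashes:
--         return 'kebab_case'
--     if has_underscores:
--         return 'snake_case'
--     return 'simple'
-- ===== Notes on version B (the rewrite author's own statement) =====
-- stated objective: alternative
-- what changed: Three separate any() scans over the whole list are replaced by one early-exit pass maintaining dash/underscore flags, resolving the same dot>dash>underscore priority after the loop.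
import Mathlib
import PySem

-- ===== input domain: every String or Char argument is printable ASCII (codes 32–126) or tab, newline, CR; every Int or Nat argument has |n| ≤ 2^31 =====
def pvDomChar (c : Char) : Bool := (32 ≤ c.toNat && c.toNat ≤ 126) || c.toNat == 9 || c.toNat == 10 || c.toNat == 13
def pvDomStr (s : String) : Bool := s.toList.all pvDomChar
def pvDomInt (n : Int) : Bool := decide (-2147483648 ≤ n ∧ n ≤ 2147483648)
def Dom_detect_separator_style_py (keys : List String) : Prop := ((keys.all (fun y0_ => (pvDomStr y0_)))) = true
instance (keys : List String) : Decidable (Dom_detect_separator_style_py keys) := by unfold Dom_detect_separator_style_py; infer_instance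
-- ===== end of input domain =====

-- B replaces A's three full any() scans with one early-exit pass keeping dash/underscore flags (alternative decomposition, same result).


-- ===== PORT A =====
def detect_separator_style_py (keys : List String) : String :=
  if keys = [] then "none"
  else
    let has_dots := keys.any (fun k => PySem.Str.isIn "." k)
    let has_dashes := keys.any (fun k => PySem.Str.isIn "-" k)
    let has_underscores := keys.any (fun k => PySem.Str.isIn "_" k)
    if has_dots then "dot_notation"
    else if has_dashes then "kebab_case"
    else if has_underscores then "snake_case"
    else "simple"

-- ===== PORT B =====
-- the single early-exit pass of Source B, flags as accumulators
def dssAltLoop (keys : List String) (has_dashes has_underscores : Bool) : String :=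
  match keys with
  | [] =>
      if has_dashes then "kebab_case"
      else if has_underscores then "snake_case"
      else "simple"
  | k :: rest =>
      if PySem.Str.isIn "." k then "dot_notation"
      else dssAltLoop rest (has_dashes || PySem.Str.isIn "-" k)
                           (has_underscores || PySem.Str.isIn "_" k)

def detect_separator_style_py_alt (keys : List String) : String :=
  if keys = [] then "none" else dssAltLoop keys false false

-- ===== PRECONDITION & SPEC =====
def Spec_detect_separator_style_py (keys : List String) (out : String) : Prop := out = detect_separator_style_py_alt keys
instance (keys : List String) (out : String) : Decidable (Spec_detect_separator_style_py keys out) := by unfold Spec_detect_separator_style_py; infer_instance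

-- ===== CLAIM (what is proved, stated in full; the proofs are below) =====
def Claim_equal_detect_separator_style_py : Prop := ∀ (keys : List String), Dom_detect_separator_style_py keys → Spec_detect_separator_style_py keys (detect_separator_style_py keys)

-- ===== LEMMAS AND PROOFS =====

-- the loop with flag accumulators equals the three-scan resolution
theorem dssAltLoop_eq (keys : List String) (hd hu : Bool) :
    dssAltLoop keys hd hu =
      if keys.any (fun k => PySem.Str.isIn "." k) then "dot_notation"
      else if hd || keys.any (fun k => PySem.Str.isIn "-" k) then "kebab_case"
      else if hu || keys.any (fun k => PySem.Str.isIn "_" k) then "snake_case"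
      else "simple" := by
  induction keys generalizing hd hu with
  | nil => simp [dssAltLoop]
  | cons k rest ih =>
      cases hdot : PySem.Chars.isIn ['.'] k.toList with
      | true => simp [dssAltLoop, hdot]
      | false =>
          rw [dssAltLoop, ih]
          simp [hdot, Bool.or_assoc]

-- ===== VERDICT (by name: the statement is the Claim_ definition above) =====
theorem detect_separator_style_py_spec : Claim_equal_detect_separator_style_py := by
  intro keys _
  unfold Spec_detect_separator_style_py detect_separator_style_py detect_separator_style_py_alt
  by_cases h : keys = []
  · simp [h]
  · simp only [h, if_false, dssAltLoop_eq, Bool.false_or]
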